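-- pv_equiv track=rewrite | github.com/carlos-ferrer-fernandez/agentreadiness | apps/api/services/optimizer/document_optimizer.py | _fix_nested_code_blocks
-- ===== SOURCE A (Python) =====
-- def _fix_nested_code_blocks(md_content: str) -> str:
--     """Fix code blocks nested inside list items by pulling them out.
--
--     The Python markdown library's fenced_code extension fails to render
--     code fences that are indented inside list items (e.g., inside numbered
--     steps). This pre-processor detects such cases and restructures them
--     so code blocks are at the top level.
--     """
--     lines = md_content.split('\n')
--     result = []
--     i = 0
--     while i < len(lines):
--         line = lines[i]
--         stripped = line.lstrip()
--         indent = len(line) - len(stripped)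
--
--         # Detect a fenced code block that's indented (inside a list)
--         if stripped.startswith('```') and indent >= 2:
--             # Find the closing fence
--             lang = stripped[3:].strip()
--             code_lines = []
--             i += 1
--             while i < len(lines):
--                 inner = lines[i]
--                 inner_stripped = inner.lstrip()
--                 if inner_stripped.startswith('```') and len(inner_stripped) <= 4:
--                     i += 1
--                     break
--                 # Remove the list indentation from code lines
--                 if inner.startswith(' ' * indent):
--                     code_lines.append(inner[indent:])
--                 else:
--                     code_lines.append(inner.lstrip())
--                 i += 1
--
--             # Output the code block at top level
--             result.append('')
--             result.append(f'```{lang}')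
--             result.extend(code_lines)
--             result.append('```')
--             result.append('')
--         else:
--             result.append(line)
--             i += 1
--
--     return '\n'.join(result)
-- ===== SOURCE B (Python) =====
-- def _fix_nested_code_blocks(md_content: str) -> str:
--     """Block-at-a-time rewrite: split the line list at fence boundaries with a
--     span helper and bulk-transform each code body, instead of scanning line by line."""
--     def span(pred, xs):
--         i = 0
--         while i < len(xs) and pred(xs[i]):
--             i += 1
--         return xs[:i], xs[i:]
--
--     def is_open(l):
--         s = l.lstrip()
--         return s.startswith('```') and len(l) - len(s) >= 2
--
--     def is_close(l):
--         s = l.lstrip()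
--         return s.startswith('```') and len(s) <= 4
--
--     out = []
--     rest = md_content.split('\n')
--     while rest:
--         pre, rest = span(lambda l: not is_open(l), rest)
--         out += pre
--         if not rest:
--             break
--         fence, rest = rest[0], rest[1:]
--         s = fence.lstrip()
--         indent = len(fence) - len(s)
--         lang = s[3:].strip()
--         body, rest = span(lambda l: not is_close(l), rest)
--         rest = rest[1:]
--         out += [''] + ['```' + lang] + [
--             l[indent:] if l.startswith(' ' * indent) else l.lstrip() for l in body
--         ] + ['```', '']
--     return '\n'.join(out)
-- ===== Notes on version B (the rewrite author's own statement) =====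
-- stated objective: alternative
-- what changed: A's per-line nested while-loops with manual index bookkeeping are replaced by a block-at-a-time rewrite: a span/split helper cuts the line list at fence boundaries (prefix before the next open fence, body up to the close fence) and each code body is transformed in bulk by a comprehension, with whole blocks appended at once.
import Mathlib
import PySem

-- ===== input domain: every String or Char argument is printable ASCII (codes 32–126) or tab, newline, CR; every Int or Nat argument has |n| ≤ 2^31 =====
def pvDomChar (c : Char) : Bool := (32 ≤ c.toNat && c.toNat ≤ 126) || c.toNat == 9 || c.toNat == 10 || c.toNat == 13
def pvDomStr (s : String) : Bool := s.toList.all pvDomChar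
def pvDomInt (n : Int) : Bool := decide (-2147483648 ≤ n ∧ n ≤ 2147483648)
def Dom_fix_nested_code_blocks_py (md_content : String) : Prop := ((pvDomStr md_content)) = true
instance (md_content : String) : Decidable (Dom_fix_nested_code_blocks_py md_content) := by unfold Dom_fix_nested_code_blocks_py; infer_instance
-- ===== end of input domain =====

-- B (the _alt port) rewrites block-at-a-time: it splits the line list at fence
-- boundaries with takeWhile/dropWhile and bulk-maps each code body, instead of
-- A's per-line nested-loop scan; objective: alternative decomposition, same output.

-- ===== PORT A =====
-- A's inner while loop: collect de-indented code lines until a closing fence; returns (code_lines, remaining lines).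
def pvAInner (indent : Int) : List String → List String × List String
  | [] => ([], [])
  | inner :: rest =>
    let innerStripped := PySem.Str.lstrip inner
    if PySem.Str.startswith innerStripped "```" ∧ PySem.Str.len innerStripped ≤ 4 then
      ([], rest)
    else
      let codeLine :=
        if PySem.Str.startswith inner (String.ofList (List.replicate indent.toNat ' ')) then
          PySem.Str.slice inner (some indent) none
        else
          PySem.Str.lstrip inner
      let p := pvAInner indent rest
      (codeLine :: p.1, p.2)

theorem pvAInner_rest_le (indent : Int) (xs : List String) :
    (pvAInner indent xs).2.length ≤ xs.length := by
  induction xs with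
  | nil => simp [pvAInner]
  | cons x rest ih =>
    simp only [pvAInner]
    split
    · simp
    · simpa using Nat.le_succ_of_le ih

-- A's outer while loop over the line list.
def pvALoop : List String → List String
  | [] => []
  | line :: rest =>
    let stripped := PySem.Str.lstrip line
    let indent := PySem.Str.len line - PySem.Str.len stripped
    if PySem.Str.startswith stripped "```" ∧ indent ≥ 2 then
      let lang := PySem.Str.strip (PySem.Str.slice stripped (some 3) none)
      let p := pvAInner indent rest
      "" :: ("```" ++ lang) :: (p.1 ++ ("```" :: "" :: pvALoop p.2))
    else
      line :: pvALoop rest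
  termination_by ls => ls.length
  decreasing_by
  · exact Nat.lt_succ_of_le (pvAInner_rest_le _ rest)
  · simp

def fix_nested_code_blocks_py (md_content : String) : String :=
  let lines := (PySem.Str.split? md_content "\n").getD []
  PySem.Str.join "\n" (pvALoop lines)

-- ===== PORT B =====
-- Source B's is_open / is_close predicates.
def pvIsOpen (l : String) : Bool :=
  let s := PySem.Str.lstrip l
  PySem.Str.startswith s "```" && decide (PySem.Str.len l - PySem.Str.len s ≥ 2)

def pvIsClose (l : String) : Bool :=
  let s := PySem.Str.lstrip l
  PySem.Str.startswith s "```" && decide (PySem.Str.len s ≤ 4)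

-- Source B's per-body-line comprehension expression.
def pvDeindent (indent : Int) (l : String) : String :=
  if PySem.Str.startswith l (String.ofList (List.replicate indent.toNat ' ')) then
    PySem.Str.slice l (some indent) none
  else
    PySem.Str.lstrip l

-- Source B's while loop: span off the prefix before the next open fence (takeWhile/
-- dropWhile = the span helper), then span off the body up to the close fence,
-- bulk-map the de-indent over the body and emit the whole block at once.
def pvBGo (rest : List String) : List String :=
  let pre := rest.takeWhile (fun l => !pvIsOpen l)
  match hd : rest.dropWhile (fun l => !pvIsOpen l) with
  | [] => pre
  | fence :: tl =>
    let s := PySem.Str.lstrip fence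
    let indent := PySem.Str.len fence - PySem.Str.len s
    let lang := PySem.Str.strip (PySem.Str.slice s (some 3) none)
    let code := (tl.takeWhile (fun l => !pvIsClose l)).map (pvDeindent indent)
    pre ++ "" :: ("```" ++ lang) ::
      (code ++ "```" :: "" :: pvBGo ((tl.dropWhile (fun l => !pvIsClose l)).tail))
  termination_by rest.length
  decreasing_by
    have h1 : (rest.dropWhile (fun l => !pvIsOpen l)).length ≤ rest.length :=
      List.length_dropWhile_le _ _
    rw [hd] at h1
    have h2 : (tl.dropWhile (fun l => !pvIsClose l)).length ≤ tl.length :=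
      List.length_dropWhile_le _ _
    have h3 : ((tl.dropWhile (fun l => !pvIsClose l)).tail).length ≤
        (tl.dropWhile (fun l => !pvIsClose l)).length := by
      simp [List.length_tail]
    simp only [List.length_cons] at h1
    omega

def fix_nested_code_blocks_py_alt (md_content : String) : String :=
  let lines := (PySem.Str.split? md_content "\n").getD []
  PySem.Str.join "\n" (pvBGo lines)

-- ===== PRECONDITION & SPEC =====
def Spec_fix_nested_code_blocks_py (md_content : String) (out : String) : Prop := out = fix_nested_code_blocks_py_alt md_content
instance (md_content : String) (out : String) : Decidable (Spec_fix_nested_code_blocks_py md_content out) := by unfold Spec_fix_nested_code_blocks_py; infer_instance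

-- ===== CLAIM (what is proved, stated in full; the proofs are below) =====
def Claim_equal_fix_nested_code_blocks_py : Prop := ∀ (md_content : String), Dom_fix_nested_code_blocks_py md_content → Spec_fix_nested_code_blocks_py md_content (fix_nested_code_blocks_py md_content)

-- ===== LEMMAS AND PROOFS =====

-- A's inner loop computes exactly B's (take body, bulk de-indent, drop past close) split.
theorem pvAInner_eq_span (indent : Int) (xs : List String) :
    pvAInner indent xs =
      ((xs.takeWhile (fun l => !pvIsClose l)).map (pvDeindent indent),
       (xs.dropWhile (fun l => !pvIsClose l)).tail) := by
  induction xs with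
  | nil => simp [pvAInner]
  | cons x rest ih =>
    by_cases hc : pvIsClose x
    · simp [pvAInner, hc]
      simpa [pvIsClose] using hc
    · simp [pvAInner, hc, ih, pvDeindent]
      simpa [pvIsClose, not_and, not_le] using hc

-- Unfolding pvBGo at an opening-fence head: the whole block is emitted at once.
theorem pvBGo_cons_open (line : String) (rest : List String) (ho : pvIsOpen line = true) :
    pvBGo (line :: rest) =
      "" :: ("```" ++ PySem.Str.strip (PySem.Str.slice (PySem.Str.lstrip line) (some 3) none)) ::
        (((rest.takeWhile (fun l => !pvIsClose l)).map
            (pvDeindent (PySem.Str.len line - PySem.Str.len (PySem.Str.lstrip line)))) ++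
          "```" :: "" :: pvBGo ((rest.dropWhile (fun l => !pvIsClose l)).tail)) := by
  have hD : (line :: rest).dropWhile (fun l => !pvIsOpen l) = line :: rest := by
    simp [ho]
  have hT : (line :: rest).takeWhile (fun l => !pvIsOpen l) = [] := by
    simp [ho]
  rw [pvBGo.eq_def]
  split
  · rename_i heq
    rw [hD] at heq; cases heq
  · rename_i fence tl heq
    rw [hD] at heq
    cases heq
    rw [hT]
    simp

-- Unfolding pvBGo at a non-fence head: the line joins the passed-through prefix.
theorem pvBGo_cons_not_open (line : String) (rest : List String) (ho : pvIsOpen line = false) :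
    pvBGo (line :: rest) = line :: pvBGo rest := by
  have hD : (line :: rest).dropWhile (fun l => !pvIsOpen l) = rest.dropWhile (fun l => !pvIsOpen l) := by
    simp [ho]
  have hT : (line :: rest).takeWhile (fun l => !pvIsOpen l) = line :: rest.takeWhile (fun l => !pvIsOpen l) := by
    simp [ho]
  rw [pvBGo.eq_def]
  conv_rhs => rw [pvBGo.eq_def]
  split
  · rename_i heq
    rw [hD] at heq
    split
    · rw [hT]
    · rename_i f2 t2 heq2
      rw [heq] at heq2; cases heq2
  · rename_i fence tl heq
    rw [hD] at heq
    split
    · rename_i heq2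
      rw [heq] at heq2; cases heq2
    · rename_i f2 t2 heq2
      rw [heq] at heq2
      cases heq2
      rw [hT]
      simp

-- The main equivalence of the two loops, by strong induction on the number of lines.
theorem pvALoop_eq_pvBGo_aux (n : Nat) :
    ∀ xs : List String, xs.length ≤ n → pvALoop xs = pvBGo xs := by
  induction n with
  | zero =>
    intro xs h
    have : xs = [] := List.eq_nil_of_length_eq_zero (Nat.le_zero.mp h)
    subst this
    simp [pvALoop, pvBGo]
  | succ n ih =>
    intro xs h
    cases xs with
    | nil => simp [pvALoop, pvBGo]
    | cons line rest =>
      by_cases ho : pvIsOpen line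
      · have ho' : PySem.Str.startswith (PySem.Str.lstrip line) "```" ∧
            PySem.Str.len line - PySem.Str.len (PySem.Str.lstrip line) ≥ 2 := by
          have := ho
          simp [pvIsOpen] at this
          exact ⟨by simpa using this.1, by simpa using this.2⟩
        have hlen : ((rest.dropWhile (fun l => !pvIsClose l)).tail).length ≤ n := by
          have h1 : (rest.dropWhile (fun l => !pvIsClose l)).length ≤ rest.length :=
            List.length_dropWhile_le _ _
          have h2 : ((rest.dropWhile (fun l => !pvIsClose l)).tail).length ≤
              (rest.dropWhile (fun l => !pvIsClose l)).length := by
            simp [List.length_tail]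
          simp only [List.length_cons] at h
          omega
        rw [pvALoop, pvBGo_cons_open line rest ho]
        rw [if_pos ho', pvAInner_eq_span]
        simp [ih _ hlen]
      · have ho' : ¬(PySem.Str.startswith (PySem.Str.lstrip line) "```" ∧
            PySem.Str.len line - PySem.Str.len (PySem.Str.lstrip line) ≥ 2) := by
          intro hcontra
          exact ho (by simp [pvIsOpen]; exact ⟨by simpa using hcontra.1, by simpa using hcontra.2⟩)
        have hlen : rest.length ≤ n := by simp only [List.length_cons] at h; omega
        rw [pvALoop, pvBGo_cons_not_open line rest (by simpa using ho)]
        rw [if_neg ho']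
        simp [ih _ hlen]

theorem pvALoop_eq_pvBGo (xs : List String) : pvALoop xs = pvBGo xs :=
  pvALoop_eq_pvBGo_aux xs.length xs le_rfl

-- ===== VERDICT (by name: the statement is the Claim_ definition above) =====
theorem fix_nested_code_blocks_py_spec : Claim_equal_fix_nested_code_blocks_py := by
  intro md _
  unfold Spec_fix_nested_code_blocks_py fix_nested_code_blocks_py fix_nested_code_blocks_py_alt
  simp only [pvALoop_eq_pvBGo]
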